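-- pv_equiv track=rewrite | github.com/cry999/AtCoder | beginner/014/B.py | sum_price
-- ===== SOURCE A (Python) =====
-- def sum_price(n: int, X: int, A: list)->int:
--     k = 0
--     price = 0
--     while X > 0:
--         if X & 1 != 0:
--             price += A[k]
--         X >>= 1
--         k += 1
--     return price
-- ===== SOURCE B (Python) =====
-- def sum_price(n: int, X: int, A: list) -> int:
--     price = 0
--     while X > 0:
--         k = X.bit_length() - 1      # index of the highest set bit
--         price += A[k]
--         X -= 1 << k                 # clear that bit
--     return price
-- ===== Notes on version B (the rewrite author's own statement) =====
-- stated objective: alternative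
-- what changed: B iterates only over the set bits of X, extracting the highest set bit via bit_length and clearing it, instead of A's bit-by-bit shift loop with a position counter.
import Mathlib
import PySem

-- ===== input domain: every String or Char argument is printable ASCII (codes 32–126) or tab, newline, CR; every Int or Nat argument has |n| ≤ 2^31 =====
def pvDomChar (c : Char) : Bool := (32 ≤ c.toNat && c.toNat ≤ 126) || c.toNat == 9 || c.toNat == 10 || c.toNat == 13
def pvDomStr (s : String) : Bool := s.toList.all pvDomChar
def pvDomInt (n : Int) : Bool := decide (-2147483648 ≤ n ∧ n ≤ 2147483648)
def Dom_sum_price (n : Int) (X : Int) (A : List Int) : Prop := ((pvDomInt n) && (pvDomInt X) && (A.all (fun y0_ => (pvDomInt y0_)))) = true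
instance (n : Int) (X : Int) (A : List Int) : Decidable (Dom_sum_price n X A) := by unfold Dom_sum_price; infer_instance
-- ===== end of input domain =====

-- B replaces A's bit-by-bit shift loop (counter k, shift X right each step) by a loop over the
-- set bits only: take the highest set bit via bit_length, add A[k], clear the bit.  Same values.

-- ===== PORT A =====
-- while X > 0: if X & 1 != 0: price += A[k]; X >>= 1; k += 1
-- X & 1 != 0 is ported as mod X 2 ≠ 0 (exact: bit 0 of a two's-complement int is X mod 2);
-- X >>= 1 is floor division by 2 (exact for all ints); A[k] with k ≥ 0 is A.getD k 0, the
-- out-of-range case (IndexError) is excluded by Pre_sum_price.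
def sumPriceLoopA (A : List Int) (X : Int) (k : Nat) (price : Int) : Int :=
  if h : 0 < X then
    sumPriceLoopA A (PySem.Int.floordiv X 2) (k + 1)
      (if PySem.Int.mod X 2 ≠ 0 then price + A.getD k 0 else price)
  else price
termination_by X.toNat
decreasing_by
  rw [PySem.Int.floordiv_eq_ediv_of_pos (by omega)]
  omega

def sum_price (n : Int) (X : Int) (A : List Int) : Int :=
  sumPriceLoopA A X 0 0

-- ===== PORT B =====
-- while X > 0: k = X.bit_length() - 1; price += A[k]; X -= 1 << k
-- X.bit_length() is PySem.Int.bitLength; 1 << k is 2 ^ k; A[k] as above (Pre_ excludes IndexError).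
def sumPriceLoopB (A : List Int) (X : Int) (price : Int) : Int :=
  if h : 0 < X then
    -- k = X.bit_length() - 1
    sumPriceLoopB A (X - 2 ^ (PySem.Int.bitLength X - 1))
      (price + A.getD (PySem.Int.bitLength X - 1) 0)
  else price
termination_by X.toNat
decreasing_by
  have h2 : 1 ≤ 2 ^ (PySem.Int.bitLength X - 1) := Nat.one_le_two_pow
  have h3 : ((2 : Int) ^ (PySem.Int.bitLength X - 1)) = ((2 ^ (PySem.Int.bitLength X - 1) : Nat) : Int) := by
    push_cast; ring
  omega

def sum_price_alt (n : Int) (X : Int) (A : List Int) : Int :=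
  sumPriceLoopB A X 0

-- ===== PRECONDITION & SPEC =====
-- Pre_ excludes exactly the inputs on which Python's A raises IndexError: a positive X with a
-- set bit at position ≥ len(A), i.e. X ≥ 2 ^ len(A).
def Pre_sum_price (n : Int) (X : Int) (A : List Int) : Prop := X < 2 ^ A.length
instance (n : Int) (X : Int) (A : List Int) : Decidable (Pre_sum_price n X A) := by
  unfold Pre_sum_price; infer_instance

def pvWitness_sum_price : Int × Int × List Int := (3, 5, [1, 2, 3])

def Spec_sum_price (n : Int) (X : Int) (A : List Int) (out : Int) : Prop := out = sum_price_alt n X A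
instance (n : Int) (X : Int) (A : List Int) (out : Int) : Decidable (Spec_sum_price n X A out) := by
  unfold Spec_sum_price; infer_instance

-- ===== CLAIM (what is proved, stated in full; the proofs are below) =====
def Claim_equal_sum_price : Prop := ∀ (n : Int) (X : Int) (A : List Int), Dom_sum_price n X A → Pre_sum_price n X A → Spec_sum_price n X A (sum_price n X A)

-- ===== LEMMAS AND PROOFS =====

-- reference value: the sum of A[k] over the set bits of x, low bits first
def bitSum (A : List Int) (x : Nat) (k : Nat) : Int :=
  if x = 0 then 0
  else (if x % 2 = 1 then A.getD k 0 else 0) + bitSum A (x / 2) (k + 1)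
termination_by x
decreasing_by omega

theorem loopA_cast (A : List Int) : ∀ x k price, sumPriceLoopA A (x : Nat) k price = price + bitSum A x k := by
  intro x
  induction x using Nat.strong_induction_on with
  | _ x ih =>
    intro k price
    rw [sumPriceLoopA, bitSum]
    by_cases hx : x = 0
    · subst hx; simp
    · have hpos : 0 < ((x : Nat) : Int) := by exact_mod_cast Nat.pos_of_ne_zero hx
      rw [dif_pos hpos, if_neg hx]
      have hf : PySem.Int.floordiv ((x : Nat) : Int) 2 = ((x / 2 : Nat) : Int) := by
        exact_mod_cast PySem.Int.floordiv_natCast x 2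
      have hm : PySem.Int.mod ((x : Nat) : Int) 2 = ((x % 2 : Nat) : Int) := by
        exact_mod_cast PySem.Int.mod_natCast x 2
      rw [hf, hm, ih (x / 2) (by omega) (k + 1)]
      have : ((x % 2 : Nat) : Int) ≠ 0 ↔ x % 2 = 1 := by omega
      by_cases hb : x % 2 = 1
      · rw [if_pos (this.mpr hb), if_pos hb]; ring
      · rw [if_neg (fun h => hb (this.mp h)), if_neg hb]; ring

theorem loopA_eq (A : List Int) (X : Int) (k : Nat) (price : Int) :
    sumPriceLoopA A X k price = price + bitSum A X.toNat k := by
  by_cases h : 0 < X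
  · rw [show X = ((X.toNat : Nat) : Int) from by omega, loopA_cast, Int.toNat_natCast]
  · rw [sumPriceLoopA, dif_neg h]
    have : X.toNat = 0 := by omega
    rw [this, bitSum]; simp

-- adding a bit above everything in y adds exactly A[k + j]
theorem bitSum_add_pow (A : List Int) : ∀ j y k, y < 2 ^ j →
    bitSum A (y + 2 ^ j) k = bitSum A y k + A.getD (k + j) 0 := by
  intro j
  induction j with
  | zero =>
    intro y k hy
    have : y = 0 := by omega
    subst this
    simp only [Nat.zero_add, pow_zero]
    rw [bitSum]; simp [bitSum]
  | succ j ih =>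
    intro y k hy
    have hne : y + 2 ^ (j + 1) ≠ 0 := by positivity
    rw [bitSum, if_neg hne]
    have hmod : (y + 2 ^ (j + 1)) % 2 = y % 2 := by
      omega
    have hdiv : (y + 2 ^ (j + 1)) / 2 = y / 2 + 2 ^ j := by
      have : 2 ^ (j + 1) = 2 * 2 ^ j := by ring
      omega
    rw [hmod, hdiv, ih (y / 2) (k + 1) (by omega)]
    conv_rhs => rw [bitSum]
    by_cases hy0 : y = 0
    · subst hy0
      have hkj : k + 1 + j = k + (j + 1) := by omega
      simp [bitSum, hkj]
    · rw [if_neg hy0]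
      have : k + 1 + j = k + (j + 1) := by omega
      rw [this]; ring

theorem loopB_cast (A : List Int) : ∀ x price, sumPriceLoopB A (x : Nat) price = price + bitSum A x 0 := by
  intro x
  induction x using Nat.strong_induction_on with
  | _ x ih =>
    intro price
    by_cases hx : x = 0
    · subst hx; rw [sumPriceLoopB, bitSum]; simp
    · have hpos : 0 < ((x : Nat) : Int) := by exact_mod_cast Nat.pos_of_ne_zero hx
      have hbl : PySem.Int.bitLength ((x : Nat) : Int) ≠ 0 := by
        intro h
        have := PySem.Int.lt_two_pow_bitLength ((x : Nat) : Int)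
        rw [h] at this
        simp at this
        omega
      rw [sumPriceLoopB, dif_pos hpos]
      set k := PySem.Int.bitLength ((x : Nat) : Int) - 1 with hk
      have hlo : 2 ^ k ≤ x := by
        have := PySem.Int.two_pow_bitLength_le ((x : Nat) : Int) (by exact_mod_cast hx)
        simpa using this
      have hhi : x < 2 ^ (k + 1) := by
        have := PySem.Int.lt_two_pow_bitLength ((x : Nat) : Int)
        have hk1 : k + 1 = PySem.Int.bitLength ((x : Nat) : Int) := by omega
        rw [hk1]
        simpa using this
      have hcast : ((x : Nat) : Int) - 2 ^ k = (((x - 2 ^ k : Nat)) : Int) := by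
        push_cast [hlo]; ring
      rw [hcast, ih (x - 2 ^ k) (by have : 0 < 2 ^ k := Nat.two_pow_pos k; omega)]
      have hsplit : x = (x - 2 ^ k) + 2 ^ k := by omega
      have hlt : x - 2 ^ k < 2 ^ k := by
        have : 2 ^ (k + 1) = 2 * 2 ^ k := by ring
        omega
      calc price + A.getD k 0 + bitSum A (x - 2 ^ k) 0
          = price + (bitSum A (x - 2 ^ k) 0 + A.getD (0 + k) 0) := by simp; ring
        _ = price + bitSum A ((x - 2 ^ k) + 2 ^ k) 0 := by rw [bitSum_add_pow A k (x - 2 ^ k) 0 hlt]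
        _ = price + bitSum A x 0 := by rw [← hsplit]

theorem loopB_eq (A : List Int) (X : Int) (price : Int) :
    sumPriceLoopB A X price = price + bitSum A X.toNat 0 := by
  by_cases h : 0 < X
  · rw [show X = ((X.toNat : Nat) : Int) from by omega, loopB_cast, Int.toNat_natCast]
  · rw [sumPriceLoopB, dif_neg h]
    have : X.toNat = 0 := by omega
    rw [this, bitSum]; simp

-- ===== VERDICT (by name: the statement is the Claim_ definition above) =====
theorem sum_price_spec : Claim_equal_sum_price := by
  intro n X A _ _
  unfold Spec_sum_price sum_price sum_price_alt
  rw [loopA_eq, loopB_eq]
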